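-- pv_equiv track=rewrite | github.com/aliyun/alibabacloud-maxcompute-odbc-driver | scripts/generate_license_rtf.py | text_to_rtf
-- ===== SOURCE A (Python) =====
-- def text_to_rtf(text: str) -> str:
--     """Convert plain text to minimal RTF."""
--     # Escape RTF special characters
--     text = text.replace("\\", "\\\\")
--     text = text.replace("{", "\\{")
--     text = text.replace("}", "\\}")
--
--     # Convert lines
--     lines = text.split("\n")
--     rtf_lines = []
--     for line in lines:
--         rtf_lines.append(line + "\\par")
--
--     body = "\n".join(rtf_lines)
--
--     return (
--         "{\\rtf1\\ansi\\deff0"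
--         "{\\fonttbl{\\f0\\fswiss\\fcharset0 Calibri;}}"
--         "\\viewkind4\\uc1\\pard\\f0\\fs20 "
--         + body
--         + "}"
--     )
-- ===== SOURCE B (Python) =====
-- def text_to_rtf(text: str) -> str:
--     """Convert plain text to minimal RTF."""
--     # One-pass escaping + line conversion via a translation table.
--     table = str.maketrans({"\\": "\\\\", "{": "\\{", "}": "\\}", "\n": "\\par\n"})
--     body = text.translate(table) + "\\par"
--     return (
--         "{\\rtf1\\ansi\\deff0"
--         "{\\fonttbl{\\f0\\fswiss\\fcharset0 Calibri;}}"
--         "\\viewkind4\\uc1\\pard\\f0\\fs20 "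
--         + body
--         + "}"
--     )
-- ===== Notes on version B (the rewrite author's own statement) =====
-- stated objective: idiomatic
-- what changed: Replaces A's three sequential whole-string replace passes plus the split/append/join line loop with a single per-character pass through a str.translate translation table that escapes \ { } and turns each newline into \par\n, appending one trailing \par.
import Mathlib
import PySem

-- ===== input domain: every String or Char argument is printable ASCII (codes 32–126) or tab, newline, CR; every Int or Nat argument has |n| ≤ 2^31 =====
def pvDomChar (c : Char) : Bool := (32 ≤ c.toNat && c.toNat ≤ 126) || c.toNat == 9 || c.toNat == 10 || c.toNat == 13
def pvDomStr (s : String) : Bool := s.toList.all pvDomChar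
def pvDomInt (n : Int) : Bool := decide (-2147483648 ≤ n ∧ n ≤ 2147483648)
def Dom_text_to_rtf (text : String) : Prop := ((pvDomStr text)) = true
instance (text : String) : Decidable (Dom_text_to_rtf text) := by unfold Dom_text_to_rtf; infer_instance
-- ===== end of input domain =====

-- B replaces A's three whole-string replace passes plus the split/append/join line loop by a single
-- per-character translation-table pass (str.translate); same return value, objective: idiomatic one-pass.

-- ===== PORT A =====
def text_to_rtf (text : String) : String :=
  let t1 := PySem.Str.replace text "\\" "\\\\"
  let t2 := PySem.Str.replace t1 "{" "\\{"
  let t3 := PySem.Str.replace t2 "}" "\\}"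
  -- text.split("\n"): sep is the non-empty literal "\n", so split? is always `some`
  let lines := (PySem.Str.split? t3 "\n").getD []
  let rtfLines := lines.foldl (fun acc line => acc ++ [line ++ "\\par"]) []
  let body := PySem.Str.join "\n" rtfLines
  "{\\rtf1\\ansi\\deff0{\\fonttbl{\\f0\\fswiss\\fcharset0 Calibri;}}\\viewkind4\\uc1\\pard\\f0\\fs20 "
    ++ body ++ "}"

-- ===== PORT B =====
-- hand port of Source B's translation table: maps a single character to its replacement, others unchanged
def rtfTable (c : Char) : List Char :=
  if c = '\\' then ['\\', '\\']
  else if c = '{' then ['\\', '{']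
  else if c = '}' then ['\\', '}']
  else if c = '\n' then "\\par\n".toList
  else [c]

def text_to_rtf_alt (text : String) : String :=
  -- text.translate(table) + "\\par"  (translate = per-character table lookup, exact on all inputs)
  let body := String.ofList (text.toList.flatMap rtfTable ++ "\\par".toList)
  "{\\rtf1\\ansi\\deff0{\\fonttbl{\\f0\\fswiss\\fcharset0 Calibri;}}\\viewkind4\\uc1\\pard\\f0\\fs20 "
    ++ body ++ "}"

-- ===== PRECONDITION & SPEC =====
def Spec_text_to_rtf (text : String) (out : String) : Prop := out = text_to_rtf_alt text
instance (text : String) (out : String) : Decidable (Spec_text_to_rtf text out) := by unfold Spec_text_to_rtf; infer_instance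

-- ===== CLAIM (what is proved, stated in full; the proofs are below) =====
def Claim_equal_text_to_rtf : Prop := ∀ (text : String), Dom_text_to_rtf text → Spec_text_to_rtf text (text_to_rtf text)

-- ===== LEMMAS AND PROOFS =====

-- one-character-pattern replace is a flatMap
theorem replace_go_single (o : Char) (new : List Char) :
    ∀ (s : List Char) (fuel : Nat) (acc : List Char), s.length ≤ fuel →
      PySem.Chars.replace.go [o] new fuel s acc
        = acc.reverse ++ s.flatMap (fun c => if c = o then new else [c]) := by
  intro s
  induction s with
  | nil =>
      intro fuel acc _
      cases fuel <;> simp [PySem.Chars.replace.go]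
  | cons c t ih =>
      intro fuel acc h
      cases fuel with
      | zero => simp at h
      | succ f =>
          by_cases hc : c = o
          · subst hc
            rw [PySem.Chars.replace.go]
            simp only [List.isPrefixOf, beq_self_eq_true, Bool.true_and,
                       if_true, List.length_cons, List.length_nil, Nat.zero_add, List.drop_succ_cons,
                       List.drop_zero]
            rw [ih f _ (by simpa using h)]
            simp
          · have hp : List.isPrefixOf [o] (c :: t) = false := by
              simp [List.isPrefixOf]; exact fun h' => hc h'.symm
            rw [PySem.Chars.replace.go]
            simp only [hp, Bool.false_eq_true, if_false]
            rw [ih f _ (by simpa using h)]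
            simp [hc]

theorem replace_single (o : Char) (new s : List Char) :
    PySem.Chars.replace s [o] new = s.flatMap (fun c => if c = o then new else [c]) := by
  simpa using replace_go_single o new s s.length [] le_rfl

-- structural split on '\n'
def splC : List Char → List (List Char)
  | [] => [[]]
  | c :: t =>
      if c = '\n' then [] :: splC t
      else
        match splC t with
        | [] => [[c]]
        | h :: r => (c :: h) :: r

theorem splC_ne_nil (s : List Char) : splC s ≠ [] := by
  cases s with
  | nil => simp [splC]
  | cons c t =>
      simp only [splC]
      split
      · simp
      · split <;> simp

theorem splitOn_go_nl (s : List Char) :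
    ∀ (fuel : Nat) (cur : List Char) (accs : List (List Char)), s.length < fuel →
      PySem.Chars.splitOn.go ['\n'] fuel s cur accs
        = accs.reverse ++ (splC s).modifyHead (cur.reverse ++ ·) := by
  induction s with
  | nil =>
      intro fuel cur accs h
      cases fuel with
      | zero => omega
      | succ f => simp [PySem.Chars.splitOn.go, splC]
  | cons c t ih =>
      intro fuel cur accs h
      cases fuel with
      | zero => omega
      | succ f =>
          by_cases hc : c = '\n'
          · subst hc
            rw [PySem.Chars.splitOn.go]
            simp only [List.isPrefixOf, beq_self_eq_true, Bool.true_and,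
                       if_true, List.length_cons, List.length_nil, Nat.zero_add, List.drop_succ_cons,
                       List.drop_zero]
            rw [ih f [] (cur.reverse :: accs) (by simpa using h)]
            rw [show splC ('\n' :: t) = [] :: splC t by simp [splC]]
            cases splC t <;> simp
          · have hp : List.isPrefixOf ['\n'] (c :: t) = false := by
              simp [List.isPrefixOf]; exact fun h' => hc h'.symm
            rw [PySem.Chars.splitOn.go]
            simp only [hp, Bool.false_eq_true, if_false]
            rw [ih f (c :: cur) accs (by simpa using h)]
            simp only [splC, hc, if_false]
            obtain ⟨h', r, hr⟩ := List.exists_cons_of_ne_nil (splC_ne_nil t)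
            simp [hr]

theorem splitOn_nl (s : List Char) : PySem.Chars.splitOn s ['\n'] = splC s := by
  rw [PySem.Chars.splitOn, splitOn_go_nl s (s.length + 1) [] [] (by omega)]
  obtain ⟨h', r, hr⟩ := List.exists_cons_of_ne_nil (splC_ne_nil s)
  simp [hr]

-- '\n'-join of lists whose head gains a char
theorem join_cons_head (sep : List Char) (c : Char) (x : List Char) (l : List (List Char)) :
    PySem.Chars.join sep ((c :: x) :: l) = c :: PySem.Chars.join sep (x :: l) := by
  cases l <;> simp [PySem.Chars.join, List.intercalate]

def parChars : List Char := ['\\', 'p', 'a', 'r']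

def nlMap (c : Char) : List Char := if c = '\n' then parChars ++ ['\n'] else [c]

theorem join_splC (s : List Char) :
    PySem.Chars.join ['\n'] ((splC s).map (· ++ parChars)) = s.flatMap nlMap ++ parChars := by
  induction s with
  | nil => simp [splC, PySem.Chars.join, List.intercalate]
  | cons c t ih =>
      by_cases hc : c = '\n'
      · subst hc
        obtain ⟨h', r, hr⟩ := List.exists_cons_of_ne_nil (splC_ne_nil t)
        rw [show splC ('\n' :: t) = [] :: splC t by simp [splC]]
        simp only [List.map_cons, List.nil_append]
        rw [hr] at ih ⊢
        simp only [List.map_cons] at ih ⊢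
        rw [show PySem.Chars.join ['\n'] (parChars :: (h' ++ parChars) :: r.map (· ++ parChars))
              = parChars ++ '\n' :: PySem.Chars.join ['\n'] ((h' ++ parChars) :: r.map (· ++ parChars)) by
            simp [PySem.Chars.join, List.intercalate]]
        simp [ih, nlMap]
      · simp only [splC, hc, if_false]
        obtain ⟨h', r, hr⟩ := List.exists_cons_of_ne_nil (splC_ne_nil t)
        rw [hr] at ih ⊢
        simp only [List.map_cons, List.cons_append] at ih ⊢
        rw [join_cons_head, ih]
        simp [nlMap, hc]

-- per-character composition of the three escapes and the line conversion equals B's table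
theorem pipeline_char (c : Char) :
    ((if c = '\\' then ['\\', '\\'] else [c]).flatMap
      (fun d => (if d = '{' then ['\\', '{'] else [d]).flatMap
        (fun e => (if e = '}' then ['\\', '}'] else [e]).flatMap nlMap)))
      = rtfTable c := by
  by_cases h1 : c = '\\'
  · subst h1; decide
  by_cases h2 : c = '{'
  · subst h2; decide
  by_cases h3 : c = '}'
  · subst h3; decide
  by_cases h4 : c = '\n'
  · subst h4; decide
  · simp [h1, h2, h3, h4, nlMap, rtfTable]

set_option maxHeartbeats 1000000 in
-- ===== VERDICT (by name: the statement is the Claim_ definition above) =====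
theorem text_to_rtf_spec : Claim_equal_text_to_rtf := by
  intro text _
  show text_to_rtf text = text_to_rtf_alt text
  apply String.toList_inj.mp
  unfold text_to_rtf text_to_rtf_alt
  dsimp only
  -- name the escaped string
  set t3 := PySem.Str.replace (PySem.Str.replace (PySem.Str.replace text "\\" "\\\\") "{" "\\{") "}" "\\}" with ht3
  -- resolve the split
  have hsplit : PySem.Str.split? t3 "\n" = some ((splC t3.toList).map String.ofList) := by
    have h := PySem.Str.split?_map t3 "\n"
    rw [show ("\n" : String).toList = ['\n'] from rfl] at h
    rw [PySem.Chars.split?] at h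
    simp only [List.isEmpty_cons, Bool.false_eq_true, if_false] at h
    cases he : PySem.Str.split? t3 "\n" with
    | none => rw [he] at h; simp at h
    | some L =>
        rw [he] at h
        simp only [Option.map_some, Option.some_inj] at h
        rw [splitOn_nl] at h
        rw [← h, List.map_map]
        simp [Function.comp_def, String.ofList_toList]
  rw [hsplit]
  simp only [Option.getD_some]
  rw [PySem.List.foldl_append_singleton_eq_map]
  simp only [String.toList_append, PySem.Str.toList_join, List.map_map]
  rw [show ("\n" : String).toList = ['\n'] from rfl]
  have hmap : List.map String.toList ([] ++ List.map ((fun line => line ++ "\\par") ∘ String.ofList) (splC t3.toList))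
      = (splC t3.toList).map (· ++ parChars) := by
    simp only [List.nil_append, List.map_map]
    apply List.map_congr_left
    intro a _
    show (String.ofList a ++ "\\par").toList = a ++ parChars
    rw [String.toList_append, String.toList_ofList]
    rfl
  rw [hmap, join_splC]
  -- now reduce t3 to the flatMap form
  have ht3l : t3.toList = ((text.toList.flatMap
        (fun c => if c = '\\' then ['\\', '\\'] else [c])).flatMap
        (fun d => if d = '{' then ['\\', '{'] else [d])).flatMap
        (fun d => if d = '}' then ['\\', '}'] else [d]) := by
    rw [ht3]
    simp only [PySem.Str.toList_replace]
    rw [show ("\\" : String).toList = ['\\'] from rfl,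
        show ("\\\\" : String).toList = ['\\', '\\'] from rfl,
        show ("{" : String).toList = ['{'] from rfl,
        show ("\\{" : String).toList = ['\\', '{'] from rfl,
        show ("}" : String).toList = ['}'] from rfl,
        show ("\\}" : String).toList = ['\\', '}'] from rfl]
    rw [replace_single, replace_single, replace_single]
  rw [ht3l]
  simp only [List.flatMap_assoc]
  simp only [pipeline_char]
  simp [parChars, String.toList_append, String.toList_ofList, List.append_assoc]
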